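-- pv_equiv track=rewrite | github.com/shiveshsky/datastructures | strings/regroup_strings.py | bring_to_begining
-- ===== SOURCE A (Python) =====
-- def bring_to_begining(A, dig):
--     count = 0
--     i=0
--     index = 0
--     while i<len(A) and index<len(A):
--         if A[i] == dig:
--             if index<i:
--                 count+=(i-index)
--                 index+=1
--             else:
--                 index += 1
--         else:
--             pass
--         i+=1
--
--
--     return count
-- ===== SOURCE B (Python) =====
-- def bring_to_begining(A, dig):
--     c = A.count(dig)
--     s = sum(i for i, x in enumerate(A) if x == dig)
--     return s - c * (c - 1) // 2
-- ===== Notes on version B (the rewrite author's own statement) =====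
-- stated objective: simpler
-- what changed: Replaces the running-displacement while-loop (per-occurrence index/count bookkeeping) with a closed form: the sum of the indices of the occurrences minus the triangular number of the occurrence count.
import Mathlib
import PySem

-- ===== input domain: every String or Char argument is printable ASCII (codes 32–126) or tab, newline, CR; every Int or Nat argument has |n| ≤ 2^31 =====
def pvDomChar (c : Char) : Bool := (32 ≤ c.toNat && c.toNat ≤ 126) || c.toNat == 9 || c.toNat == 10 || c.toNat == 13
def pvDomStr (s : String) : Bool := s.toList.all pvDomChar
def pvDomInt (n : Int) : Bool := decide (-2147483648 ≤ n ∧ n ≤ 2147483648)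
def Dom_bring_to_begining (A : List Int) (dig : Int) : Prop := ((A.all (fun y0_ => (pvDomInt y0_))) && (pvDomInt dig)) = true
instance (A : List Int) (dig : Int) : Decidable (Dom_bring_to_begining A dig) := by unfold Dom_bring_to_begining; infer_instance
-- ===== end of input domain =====

-- B replaces A's running-displacement while-loop with the closed form
-- (sum of indices of occurrences) - c*(c-1)//2 — simpler, one arithmetic identity.

-- ===== PORT A =====
-- the while loop of A: state (i, index, count), n = len(A); the list argument is the suffix A[i:]
def bring_to_beginingGo (dig : Int) (n : Nat) : List Int → Nat → Nat → Int → Int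
  | [], _, _, count => count
  | x :: rest, i, index, count =>
    if index < n then
      if x = dig then
        if index < i then
          bring_to_beginingGo dig n rest (i+1) (index+1) (count + ((i : Int) - (index : Int)))
        else
          bring_to_beginingGo dig n rest (i+1) (index+1) count
      else
        bring_to_beginingGo dig n rest (i+1) index count
    else count

def bring_to_begining (A : List Int) (dig : Int) : Int :=
  bring_to_beginingGo dig A.length A 0 0 0

-- ===== PORT B =====
def bring_to_begining_alt (A : List Int) (dig : Int) : Int :=
  let c : Int := (PySem.List.count A dig : Int)
  let s : Int := (PySem.List.enumerate A).foldl
      (fun acc p => if p.2 = dig then acc + p.1 else acc) 0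
  s - PySem.Int.floordiv (c * (c - 1)) 2

-- ===== PRECONDITION & SPEC =====
def Spec_bring_to_begining (A : List Int) (dig : Int) (out : Int) : Prop := out = bring_to_begining_alt A dig
instance (A : List Int) (dig : Int) (out : Int) : Decidable (Spec_bring_to_begining A dig out) := by unfold Spec_bring_to_begining; infer_instance

-- ===== CLAIM (what is proved, stated in full; the proofs are below) =====
def Claim_equal_bring_to_begining : Prop := ∀ (A : List Int) (dig : Int), Dom_bring_to_begining A dig → Spec_bring_to_begining A dig (bring_to_begining A dig)

-- ===== LEMMAS AND PROOFS =====

-- sum of indices (starting at i) of the occurrences of dig in L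
def pvSumM (dig : Int) : List Int → Int → Int
  | [], _ => 0
  | x :: rest, i => (if x = dig then i else 0) + pvSumM dig rest (i + 1)

-- tri a c = a + (a+1) + … + (a+c-1)
def pvTri : Int → Nat → Int
  | _, 0 => 0
  | a, c + 1 => a + pvTri (a + 1) c

theorem pvTri_shift (c : Nat) : ∀ a : Int, pvTri a c = c * a + pvTri 0 c := by
  induction c with
  | zero => intro a; simp [pvTri]
  | succ c ih =>
    intro a
    have h1 := ih (a + 1)
    have h2 := ih 1
    simp only [pvTri] at *
    push_cast
    rw [h1, h2]; ring

theorem pvTri_two_mul (c : Nat) : 2 * pvTri 0 c = (c : Int) * ((c : Int) - 1) := by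
  induction c with
  | zero => simp [pvTri]
  | succ c ih =>
    have h := pvTri_shift c 1
    simp only [pvTri, zero_add]
    rw [h]
    push_cast
    nlinarith [ih]

theorem pvGo_eq (dig : Int) (n : Nat) :
    ∀ (L : List Int) (i index : Nat) (count : Int),
      index ≤ i → i + L.length ≤ n →
      bring_to_beginingGo dig n L i index count
        = count + pvSumM dig L i - pvTri index (L.count dig) := by
  intro L
  induction L with
  | nil => intro i index count _ _; simp [bring_to_beginingGo, pvSumM, pvTri]
  | cons x rest ih =>
    intro i index count hle hlen
    have hin : index < n := by
      simp only [List.length_cons] at hlen; omega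
    by_cases hx : x = dig
    · by_cases hidx : index < i
      · rw [bring_to_beginingGo, if_pos hin, if_pos hx, if_pos hidx,
          ih (i+1) (index+1) _ (by omega) (by simp at hlen ⊢; omega)]
        simp [pvSumM, hx, pvTri]
        ring
      · have hii : index = i := by omega
        rw [bring_to_beginingGo, if_pos hin, if_pos hx, if_neg hidx,
          ih (i+1) (index+1) _ (by omega) (by simp at hlen ⊢; omega)]
        simp [pvSumM, hx, pvTri, hii]
        ring
    · rw [bring_to_beginingGo, if_pos hin, if_neg hx,
        ih (i+1) index _ (by omega) (by simp at hlen ⊢; omega)]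
      simp [pvSumM, hx]

theorem pvFold_eq (dig : Int) :
    ∀ (L : List Int) (s acc : Int),
      (PySem.List.enumerate L s).foldl
          (fun acc p => if p.2 = dig then acc + p.1 else acc) acc
        = acc + pvSumM dig L s := by
  intro L
  induction L with
  | nil => intro s acc; simp [PySem.List.enumerate_nil, pvSumM]
  | cons x rest ih =>
    intro s acc
    rw [PySem.List.enumerate_cons]
    simp only [List.foldl_cons]
    rw [ih]
    by_cases hx : x = dig <;> simp [pvSumM, hx] <;> try ring

theorem pvFloordiv_tri (c : Nat) :
    PySem.Int.floordiv ((c : Int) * ((c : Int) - 1)) 2 = pvTri 0 c := by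
  rw [PySem.Int.floordiv_eq_ediv_of_pos (by norm_num : (0:Int) < 2)]
  have h := pvTri_two_mul c
  omega

-- ===== VERDICT (by name: the statement is the Claim_ definition above) =====
theorem bring_to_begining_spec : Claim_equal_bring_to_begining := by
  intro A dig _
  unfold Spec_bring_to_begining bring_to_begining
  rw [pvGo_eq dig A.length A 0 0 0 (le_refl 0) (by omega)]
  simp only [bring_to_begining_alt]
  rw [pvFold_eq dig A 0 0, PySem.List.count_eq, pvFloordiv_tri]
  push_cast
  ring
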